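-- pv_equiv track=rewrite | github.com/VSCodeConfigHelper/pause-console | scripts/iterm.py | join_args
-- ===== SOURCE A (Python) =====
-- from typing import List
--
-- def join_args(args: List[str]) -> str:
--   line = ""
--   for i in args:
--     line += '"'
--     for c in i:
--       if c in ['$', '`', '\\', '"']:
--         line += '\\'
--       line += c
--     line += '" '
--   return line
-- ===== SOURCE B (Python) =====
-- from typing import List
--
-- def join_args(args: List[str]) -> str:
--   return ''.join(
--     '"'
--     + i.replace('\\', '\\\\').replace('$', '\\$').replace('`', '\\`').replace('"', '\\"')
--     + '" '
--     for i in args)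
-- ===== Notes on version B (the rewrite author's own statement) =====
-- stated objective: idiomatic
-- what changed: Replaces the per-character Python loop and string-accumulator with a chain of whole-string str.replace escapes (backslash first) and a single join over quoted pieces.
import Mathlib
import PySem

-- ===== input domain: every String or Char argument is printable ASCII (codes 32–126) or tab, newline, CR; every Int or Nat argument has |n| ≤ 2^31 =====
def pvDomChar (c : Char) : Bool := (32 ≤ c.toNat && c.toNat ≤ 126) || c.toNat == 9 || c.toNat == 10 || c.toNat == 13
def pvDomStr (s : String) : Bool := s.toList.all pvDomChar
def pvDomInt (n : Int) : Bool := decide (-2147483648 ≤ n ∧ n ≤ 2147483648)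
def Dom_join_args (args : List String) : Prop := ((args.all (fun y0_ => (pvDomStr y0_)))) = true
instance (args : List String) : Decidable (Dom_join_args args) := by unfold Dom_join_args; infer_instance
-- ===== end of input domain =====

-- B replaces A's per-character accumulator loop with a chain of whole-string replace escapes
-- (backslash first) joined over quoted pieces; objective: idiomatic.

-- ===== PORT A =====
-- A's string concatenation is ported by hand over List Char (exact: Python `+=` on str is
-- code-point concatenation), with the same two nested loops and the same branch.
def join_args (args : List String) : String :=
  String.ofList (args.foldl (fun line i =>
    let line := line ++ ['"']
    let line := i.toList.foldl (fun line c =>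
      let line := if c ∈ (['$', '`', '\\', '"'] : List Char) then line ++ ['\\'] else line
      line ++ [c]) line
    line ++ ['"', ' ']) [])

-- ===== PORT B =====
def pvEscArg (i : String) : String :=
  PySem.Str.replace (PySem.Str.replace (PySem.Str.replace (PySem.Str.replace i "\\" "\\\\") "$" "\\$") "`" "\\`") "\"" "\\\""

def join_args_alt (args : List String) : String :=
  PySem.Str.join "" (args.map (fun i => "\"" ++ pvEscArg i ++ "\" "))

-- ===== PRECONDITION & SPEC =====
def Spec_join_args (args : List String) (out : String) : Prop := out = join_args_alt args
instance (args : List String) (out : String) : Decidable (Spec_join_args args out) := by unfold Spec_join_args; infer_instance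

-- ===== CLAIM (what is proved, stated in full; the proofs are below) =====
def Claim_equal_join_args : Prop := ∀ (args : List String), Dom_join_args args → Spec_join_args args (join_args args)

-- ===== LEMMAS AND PROOFS =====

def pvEscChar (c : Char) : List Char :=
  if c ∈ (['$', '`', '\\', '"'] : List Char) then ['\\', c] else [c]

-- single-character replace is a flatMap over the characters
theorem replace_go_single (c : Char) (n : List Char) (fuel : Nat) :
    ∀ (l acc : List Char), l.length ≤ fuel →
    PySem.Chars.replace.go [c] n fuel l acc
      = acc.reverse ++ l.flatMap (fun x => if x = c then n else [x]) := by
  induction fuel with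
  | zero =>
    intro l acc h
    have : l = [] := List.eq_nil_of_length_eq_zero (Nat.le_zero.mp h)
    subst this
    simp [PySem.Chars.replace.go]
  | succ fuel ih =>
    intro l acc h
    cases l with
    | nil => simp [PySem.Chars.replace.go]
    | cons x t =>
      by_cases hx : x = c
      · subst hx
        have hpre : List.isPrefixOf [x] (x :: t) = true := by
          simp [List.isPrefixOf]
        simp only [PySem.Chars.replace.go, hpre, if_pos, List.length_cons] at *
        simp only [List.length_nil, Nat.zero_add, List.drop_succ_cons, List.drop_zero]
        rw [ih t (n.reverse ++ acc) (Nat.le_of_succ_le_succ h)]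
        simp
      · have hpre : List.isPrefixOf [c] (x :: t) = false := by
          simp [List.isPrefixOf]
          exact fun hh => absurd hh.symm hx
        simp only [PySem.Chars.replace.go, hpre, Bool.false_eq_true, if_false] at *
        rw [ih t (x :: acc) (Nat.le_of_succ_le_succ h)]
        simp [hx]

theorem replace_single (c : Char) (n : List Char) (l : List Char) :
    PySem.Chars.replace l [c] n = l.flatMap (fun x => if x = c then n else [x]) := by
  have := replace_go_single c n l.length l [] (le_refl _)
  simpa [PySem.Chars.replace] using this

theorem esc_chain (l : List Char) :
    PySem.Chars.replace (PySem.Chars.replace (PySem.Chars.replace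
      (PySem.Chars.replace l ['\\'] ['\\', '\\']) ['$'] ['\\', '$']) ['`'] ['\\', '`'])
      ['"'] ['\\', '"'] = l.flatMap pvEscChar := by
  simp only [replace_single]
  induction l with
  | nil => simp
  | cons x t ih =>
    simp only [List.flatMap_cons, List.flatMap_append, ih]
    by_cases h1 : x = '\\'
    · subst h1; simp [pvEscChar]
    · by_cases h2 : x = '$'
      · subst h2; simp [pvEscChar]
      · by_cases h3 : x = '`'
        · subst h3; simp [pvEscChar]
        · by_cases h4 : x = '"'
          · subst h4; simp [pvEscChar]
          · simp [pvEscChar, h1, h2, h3, h4]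

theorem escArg_toList (i : String) :
    (pvEscArg i).toList = i.toList.flatMap pvEscChar := by
  have hb : ("\\" : String).toList = ['\\'] := by decide
  have hbb : ("\\\\" : String).toList = ['\\', '\\'] := by decide
  have hd : ("$" : String).toList = ['$'] := by decide
  have hbd : ("\\$" : String).toList = ['\\', '$'] := by decide
  have hg : ("`" : String).toList = ['`'] := by decide
  have hbg : ("\\`" : String).toList = ['\\', '`'] := by decide
  have hq : ("\"" : String).toList = ['"'] := by decide
  have hbq : ("\\\"" : String).toList = ['\\', '"'] := by decide
  simp only [pvEscArg, PySem.Str.toList_replace, hb, hbb, hd, hbd, hg, hbg, hq, hbq]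
  exact esc_chain i.toList

theorem inner_foldl (l : List Char) :
    ∀ (acc : List Char),
    l.foldl (fun line c =>
      (if c ∈ (['$', '`', '\\', '"'] : List Char) then line ++ ['\\'] else line) ++ [c]) acc
      = acc ++ l.flatMap pvEscChar := by
  induction l with
  | nil => simp
  | cons x t ih =>
    intro acc
    simp only [List.foldl_cons, List.flatMap_cons, ih, pvEscChar]
    split_ifs <;> simp

theorem outer_foldl (args : List String) :
    ∀ (acc : List Char),
    args.foldl (fun line i =>
      (i.toList.foldl (fun line c =>
        (if c ∈ (['$', '`', '\\', '"'] : List Char) then line ++ ['\\'] else line) ++ [c])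
        (line ++ ['"'])) ++ ['"', ' ']) acc
      = acc ++ args.flatMap (fun i => '"' :: (i.toList.flatMap pvEscChar ++ ['"', ' '])) := by
  induction args with
  | nil => simp
  | cons i t ih =>
    intro acc
    simp only [List.foldl_cons, List.flatMap_cons]
    rw [inner_foldl, ih]
    simp [List.flatMap]

theorem join_nil_sep (parts : List (List Char)) :
    PySem.Chars.join [] parts = parts.flatten := by
  induction parts with
  | nil => simp [PySem.Chars.join_nil]
  | cons p rest ih =>
    cases rest with
    | nil => simp [PySem.Chars.join, List.intercalate]
    | cons q r => rw [PySem.Chars.join_cons_cons, ih]; simp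

theorem alt_toList (args : List String) :
    (join_args_alt args).toList
      = args.flatMap (fun i => '"' :: (i.toList.flatMap pvEscChar ++ ['"', ' '])) := by
  have hq : ("\"" : String).toList = ['"'] := by decide
  have hqs : ("\" " : String).toList = ['"', ' '] := by decide
  have hnil : ("" : String).toList = [] := by decide
  simp only [join_args_alt, PySem.Str.toList_join, hnil, join_nil_sep, List.map_map]
  simp only [List.flatMap]
  refine congrArg List.flatten (List.map_congr_left ?_)
  intro i _
  simp [Function.comp, String.toList_append, escArg_toList, hq, hqs, List.flatMap]

-- ===== VERDICT (by name: the statement is the Claim_ definition above) =====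
theorem join_args_spec : Claim_equal_join_args := by
  intro args _
  show join_args args = join_args_alt args
  have h : (join_args args).toList = (join_args_alt args).toList := by
    rw [alt_toList]
    simp only [join_args, String.toList_ofList]
    rw [outer_foldl]
    simp
  calc join_args args = String.ofList (join_args args).toList := String.ofList_toList.symm
    _ = String.ofList (join_args_alt args).toList := by rw [h]
    _ = join_args_alt args := String.ofList_toList
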